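-- pv_equiv track=rewrite | github.com/thin2/work2025_5 | 10/3.py | process_pile
-- ===== SOURCE A (Python) =====
-- TARGETS = {0, 8, 16, 24}
--
-- def process_pile(pile):
--     reversed_pile = pile[::-1]
--     retained = []
--     discarded = []
--     ace_detected = False
--
--     for card in reversed_pile:
--         if not ace_detected:
--             if card in TARGETS:
--                 ace_detected = True
--                 retained.append(card)
--             else:
--                 discarded.append(card)
--         else:
--             retained.append(card)
--
--     return retained[::-1], discarded
-- ===== SOURCE B (Python) =====
-- TARGETS = {0, 8, 16, 24}
--
-- def process_pile(pile):
--     # Backward split-point search: find the last target from the end, then slice.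
--     n = len(pile)
--     for j, card in enumerate(pile[::-1]):
--         if card in TARGETS:
--             i = n - 1 - j
--             return list(pile[:i + 1]), list(pile[i + 1:])[::-1]
--     return [], list(pile[::-1])
-- ===== Notes on version B (the rewrite author's own statement) =====
-- stated objective: simpler
-- what changed: Replaces the two-accumulator flag-driven pass with a backward search for the last target index followed by two slices, returning as soon as the split point is found.
import Mathlib
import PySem

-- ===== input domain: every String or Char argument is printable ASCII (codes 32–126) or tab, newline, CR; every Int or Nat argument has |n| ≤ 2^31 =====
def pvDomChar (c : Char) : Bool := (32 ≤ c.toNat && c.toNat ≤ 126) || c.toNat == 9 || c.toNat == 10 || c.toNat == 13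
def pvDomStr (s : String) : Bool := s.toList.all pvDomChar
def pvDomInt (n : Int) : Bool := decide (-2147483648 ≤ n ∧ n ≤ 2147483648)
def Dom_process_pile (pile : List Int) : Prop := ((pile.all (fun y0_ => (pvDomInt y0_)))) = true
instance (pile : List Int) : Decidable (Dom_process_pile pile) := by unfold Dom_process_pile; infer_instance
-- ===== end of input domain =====

-- B replaces A's two-accumulator flag pass by a backward split-point search plus two slices (objective: simpler).

-- TARGETS = {0, 8, 16, 24}, a Python set of ints
def pvTARGETS : PySem.Set Int := PySem.Set.ofList [0, 8, 16, 24]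

-- ===== PORT A =====
-- the loop body of A, state = (retained, discarded, ace_detected)
def pvAStep (st : List Int × List Int × Bool) (card : Int) : List Int × List Int × Bool :=
  let (ret, dis, ace) := st
  if !ace then
    if PySem.Set.contains pvTARGETS card then (ret ++ [card], dis, true)
    else (ret, dis ++ [card], ace)
  else (ret ++ [card], dis, ace)

def process_pile (pile : List Int) : List Int × List Int :=
  let reversed_pile := pile.reverse          -- pile[::-1]  (PySem.List.slice?_none_none_neg_one)
  let st := reversed_pile.foldl pvAStep ([], [], false)
  (st.1.reverse, st.2.1)                      -- retained[::-1], discarded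

-- ===== PORT B =====
-- the 'for j, card in enumerate(pile[::-1])' loop of Source B, with early return at the split point
def pvBGo (pile : List Int) (n : Nat) : List Int → Nat → List Int × List Int
  | [], _ => ([], pile.reverse)               -- no target: [], list(pile[::-1])
  | card :: rest, j =>
    if PySem.Set.contains pvTARGETS card then
      let i := n - 1 - j
      (pile.take (i + 1), (pile.drop (i + 1)).reverse)   -- list(pile[:i+1]), list(pile[i+1:])[::-1]
    else pvBGo pile n rest (j + 1)

def process_pile_alt (pile : List Int) : List Int × List Int :=
  pvBGo pile pile.length pile.reverse 0

-- ===== PRECONDITION & SPEC =====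
def Spec_process_pile (pile : List Int) (out : List Int × List Int) : Prop := out = process_pile_alt pile
instance (pile : List Int) (out : List Int × List Int) : Decidable (Spec_process_pile pile out) := by unfold Spec_process_pile; infer_instance

-- ===== CLAIM (what is proved, stated in full; the proofs are below) =====
def Claim_equal_process_pile : Prop := ∀ (pile : List Int), Dom_process_pile pile → Spec_process_pile pile (process_pile pile)

-- ===== LEMMAS AND PROOFS =====

-- predicate 'not a target'
def pvNT (c : Int) : Bool := !(PySem.Set.contains pvTARGETS c)

-- A's fold once the flag is set: everything goes to retained
theorem pvA_fold_true (r ret dis : List Int) :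
    r.foldl pvAStep (ret, dis, true) = (ret ++ r, dis, true) := by
  induction r generalizing ret with
  | nil => simp
  | cons c r ih => simp [pvAStep, ih]

-- A's fold from an unset flag: takeWhile/dropWhile characterisation
theorem pvA_fold_false (r ret dis : List Int) :
    r.foldl pvAStep (ret, dis, false) =
      (ret ++ r.dropWhile pvNT, dis ++ r.takeWhile pvNT,
        !(r.dropWhile pvNT).isEmpty) := by
  induction r generalizing ret dis with
  | nil => simp
  | cons c r ih =>
    by_cases h : PySem.Set.contains pvTARGETS c
    · have hm : c ∈ pvTARGETS := by
        simpa [PySem.Set.contains_eq_decide] using h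
      simp [pvAStep, hm, pvNT, pvA_fold_true]
    · have hm : ¬ c ∈ pvTARGETS := by
        simpa [PySem.Set.contains_eq_decide] using h
      simp [pvAStep, hm, pvNT, ih]

-- B's loop characterisation (pile, n fixed)
theorem pvB_go (pile : List Int) (n : Nat) (r : List Int) (j : Nat) :
    pvBGo pile n r j =
      if r.dropWhile pvNT = [] then ([], pile.reverse)
      else
        (pile.take (n - 1 - (j + (r.takeWhile pvNT).length) + 1),
         (pile.drop (n - 1 - (j + (r.takeWhile pvNT).length) + 1)).reverse) := by
  induction r generalizing j with
  | nil => simp [pvBGo]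
  | cons c r ih =>
    by_cases h : PySem.Set.contains pvTARGETS c
    · have hm : c ∈ pvTARGETS := by
        simpa [PySem.Set.contains_eq_decide] using h
      simp [pvBGo, hm, pvNT]
    · have hm : ¬ c ∈ pvTARGETS := by
        simpa [PySem.Set.contains_eq_decide] using h
      have hstep : pvBGo pile n (c :: r) j = pvBGo pile n r (j + 1) := by
        simp [pvBGo, hm]
      have harith : n - 1 - (j + 1 + (r.takeWhile pvNT).length) + 1
          = n - 1 - (j + ((r.takeWhile pvNT).length + 1)) + 1 := by omega
      rw [hstep, ih, List.dropWhile_cons, List.takeWhile_cons]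
      simp only [pvNT, h, Bool.not_false, if_pos, List.length_cons, harith]

theorem process_pile_eq (pile : List Int) :
    process_pile pile = ((pile.reverse.dropWhile pvNT).reverse, pile.reverse.takeWhile pvNT) := by
  show ((pile.reverse.foldl pvAStep ([], [], false)).1.reverse,
        (pile.reverse.foldl pvAStep ([], [], false)).2.1)
      = ((pile.reverse.dropWhile pvNT).reverse, pile.reverse.takeWhile pvNT)
  rw [pvA_fold_false]
  simp

theorem process_pile_alt_eq (pile : List Int) :
    process_pile_alt pile = ((pile.reverse.dropWhile pvNT).reverse, pile.reverse.takeWhile pvNT) := by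
  have hTD := List.takeWhile_append_dropWhile (p := pvNT) (l := pile.reverse)
  set T := pile.reverse.takeWhile pvNT with hT
  set D := pile.reverse.dropWhile pvNT with hD
  rw [process_pile_alt, pvB_go]
  by_cases hDnil : D = []
  · have hTall : T = pile.reverse := by rw [← hTD, hDnil, List.append_nil]
    rw [if_pos hDnil, hDnil, hTall]
    simp
  · have hlen : T.length + D.length = pile.length := by
      have := congrArg List.length hTD
      simpa [List.length_append] using this
    have hDpos : 0 < D.length := List.length_pos_of_ne_nil hDnil
    have hk : pile.length - 1 - (0 + T.length) + 1 = D.length := by omega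
    have hpile : pile = D.reverse ++ T.reverse := by
      calc pile = pile.reverse.reverse := (List.reverse_reverse pile).symm
        _ = (T ++ D).reverse := by rw [hTD]
        _ = D.reverse ++ T.reverse := by simp
    rw [if_neg hDnil, hk]
    refine Prod.ext ?_ ?_
    · show pile.take D.length = D.reverse
      rw [hpile, List.take_append_of_le_length (by simp)]
      simp
    · show (pile.drop D.length).reverse = T
      rw [hpile, List.drop_append_of_le_length (by simp)]
      simp

-- ===== VERDICT (by name: the statement is the Claim_ definition above) =====
theorem process_pile_spec : Claim_equal_process_pile := by
  intro pile _
  unfold Spec_process_pile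
  rw [process_pile_eq, process_pile_alt_eq]
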